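-- pv_equiv track=rewrite | github.com/paulo-m-costa/CS1 | Midterm/midterm.py | initial_value_count
-- ===== SOURCE A (Python) =====
-- def initial_value_count(lst):
--     '''This function takes a non-empty list of integers as an argument. It
--     returns a tuple with two elements, where first element is the first value
--     in the argument list and the second element is the number of times the
--     first value is consecutively repeated starting at the beginning.'''
--     a = lst[0]
--     b = 1
--     for el in range(len(lst) - 1):
--         if lst[el] == lst[el + 1]:
--             b += 1
--         else: break
--     return (a, b)
-- ===== SOURCE B (Python) =====
-- def initial_value_count(lst):
--     # Run-length-encode the whole list, then report the first run.
--     runs = []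
--     for x in lst:
--         if runs and runs[-1][0] == x:
--             runs[-1] = (runs[-1][0], runs[-1][1] + 1)
--         else:
--             runs.append((x, 1))
--     return runs[0]
-- ===== Notes on version B (the rewrite author's own statement) =====
-- stated objective: alternative
-- what changed: Replaces A's early-break adjacent-pair index loop with a two-stage approach: build the full run-length encoding of the list, then return its first run.
import Mathlib
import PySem

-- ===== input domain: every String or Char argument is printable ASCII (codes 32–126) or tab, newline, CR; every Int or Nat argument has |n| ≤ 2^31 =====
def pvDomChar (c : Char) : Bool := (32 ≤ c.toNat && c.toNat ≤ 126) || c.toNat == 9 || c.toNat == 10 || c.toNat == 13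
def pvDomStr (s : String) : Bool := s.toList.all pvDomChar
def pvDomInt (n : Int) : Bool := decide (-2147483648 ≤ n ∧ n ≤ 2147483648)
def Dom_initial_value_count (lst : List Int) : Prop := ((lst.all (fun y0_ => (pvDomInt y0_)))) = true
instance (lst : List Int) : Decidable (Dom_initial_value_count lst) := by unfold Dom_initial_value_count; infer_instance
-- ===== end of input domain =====

-- B builds the full run-length encoding of the list and returns its first run, instead of A's early-break adjacent-pair index loop; alternative decomposition, same task.


-- ===== PORT A =====
-- A's for-loop over range(len(lst)-1) comparing lst[el] with lst[el+1], with break: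
-- ported as structural recursion over adjacent pairs carrying the counter b (break = return b).
def initial_value_count_loop : Int → List Int → Int
  | b, x :: y :: rest => if x = y then initial_value_count_loop (b + 1) (y :: rest) else b
  | b, _ => b

def initial_value_count (lst : List Int) : Int × Int :=
  match lst with
  | [] => (0, 0)  -- unreachable: lst[0] raises IndexError (excluded by Pre_)
  | a :: _ => (a, initial_value_count_loop 1 lst)

-- ===== PORT B =====
-- Source B's loop body: extend the run list `runs` with one element x
-- (runs[-1] lookup / in-place update of the last pair / append, as in Source B).
def ivcStep (runs : List (Int × Int)) (x : Int) : List (Int × Int) :=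
  match runs.getLast? with
  | some (v, c) => if v = x then runs.dropLast ++ [(v, c + 1)] else runs ++ [(x, 1)]
  | none => [(x, 1)]

def initial_value_count_alt (lst : List Int) : Int × Int :=
  match (lst.foldl ivcStep []).head? with
  | some p => p
  | none => (0, 0)  -- unreachable: runs[0] raises IndexError on empty input (excluded by Pre_)

-- ===== PRECONDITION & SPEC =====
-- A raises IndexError on the empty list (lst[0]); so does B (runs[0]).
def Pre_initial_value_count (lst : List Int) : Prop := lst ≠ []
instance (lst : List Int) : Decidable (Pre_initial_value_count lst) := by unfold Pre_initial_value_count; infer_instance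
def pvWitness_initial_value_count : List Int := ([1, 1, 2])
def Spec_initial_value_count (lst : List Int) (out : Int × Int) : Prop := out = initial_value_count_alt lst
instance (lst : List Int) (out : Int × Int) : Decidable (Spec_initial_value_count lst out) := by unfold Spec_initial_value_count; infer_instance

-- ===== CLAIM (what is proved, stated in full; the proofs are below) =====
def Claim_equal_initial_value_count : Prop := ∀ (lst : List Int), Dom_initial_value_count lst → Pre_initial_value_count lst → Spec_initial_value_count lst (initial_value_count lst)

-- ===== LEMMAS AND PROOFS =====
theorem ivcStep_ne_nil (runs : List (Int × Int)) (x : Int) : ivcStep runs x ≠ [] := by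
  unfold ivcStep
  cases h : runs.getLast? with
  | none => simp
  | some p => cases p with | mk v c => dsimp; split <;> simp

theorem foldl_ivcStep_append (xs : List Int) : ∀ (rs l : List (Int × Int)), l ≠ [] →
    xs.foldl ivcStep (rs ++ l) = rs ++ xs.foldl ivcStep l := by
  induction xs with
  | nil => intro rs l _; simp
  | cons x xt ih =>
    intro rs l hl
    have hstep : ivcStep (rs ++ l) x = rs ++ ivcStep l x := by
      unfold ivcStep
      rw [List.getLast?_append_of_ne_nil rs hl]
      cases h : l.getLast? with
      | none => exact absurd (List.getLast?_eq_none_iff.mp h) hl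
      | some p =>
        cases p with
        | mk v c =>
          dsimp
          split
          · rw [List.dropLast_append_of_ne_nil hl, List.append_assoc]
          · rw [List.append_assoc]
    simp only [List.foldl_cons, hstep]
    exact ih rs (ivcStep l x) (ivcStep_ne_nil l x)

theorem foldl_ivcStep_head (xs : List Int) : ∀ (a c : Int),
    (List.foldl ivcStep [(a, c)] xs).head? =
      some (a, c + ((xs.takeWhile (fun y => y == a)).length : Int)) := by
  induction xs with
  | nil => intro a c; simp
  | cons x xt ih =>
    intro a c
    by_cases h : x = a
    · subst h
      have : ivcStep [(x, c)] x = [(x, c + 1)] := by simp [ivcStep]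
      simp only [List.foldl_cons, this, ih x (c + 1), List.takeWhile, BEq.rfl]
      simp; ring
    · have hst : ivcStep [(a, c)] x = [(a, c)] ++ [(x, 1)] := by
        simp [ivcStep, Ne.symm h]
      simp only [List.foldl_cons, hst,
        foldl_ivcStep_append xt [(a, c)] [(x, 1)] (by simp), List.takeWhile]
      rw [beq_eq_false_iff_ne.mpr h]
      simp

theorem initial_value_count_loop_eq (xs : List Int) : ∀ (x b : Int),
    initial_value_count_loop b (x :: xs) = b + ((xs.takeWhile (fun y => y == x)).length : Int) := by
  induction xs with
  | nil => intro x b; simp [initial_value_count_loop]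
  | cons y rest ih =>
    intro x b
    by_cases h : x = y
    · subst h
      simp only [initial_value_count_loop, ih x (b + 1), List.takeWhile, BEq.rfl]
      simp; ring
    · simp only [initial_value_count_loop, if_neg h, List.takeWhile]
      rw [beq_eq_false_iff_ne.mpr (Ne.symm h)]
      simp

-- ===== VERDICT (by name: the statement is the Claim_ definition above) =====
theorem initial_value_count_spec : Claim_equal_initial_value_count := by
  intro lst _ hpre
  unfold Spec_initial_value_count
  match lst with
  | [] => exact absurd rfl hpre
  | a :: rest =>
    have hB : initial_value_count_alt (a :: rest) =
        (a, 1 + ((rest.takeWhile (fun y => y == a)).length : Int)) := by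
      have h0 : ivcStep [] a = [(a, 1)] := by simp [ivcStep]
      unfold initial_value_count_alt
      simp only [List.foldl_cons, h0, foldl_ivcStep_head rest a 1]
    rw [hB]
    simp only [initial_value_count, initial_value_count_loop_eq rest a 1]
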